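-- pv_equiv track=rewrite | github.com/taosdata/taos-connector-python | taos/utils.py | detectListNone
-- ===== SOURCE A (Python) =====
-- ALL_NONE     = 0  # all list item is none
--
-- HAVE_NONE    = 1  # list item some is none, some is not none
--
-- NOFOUND_NONE = 2  # all list item no found none
--
-- def detectListNone(items):
--     if items is None:
--         return ALL_NONE
--     # loop
--     n0 = 0 # none count
--     n1 = 0 # not noen count
--     for item in items:
--         if item is None:
--             n0 += 1
--         else:
--             n1 += 1
--
--     # return
--     if n0 == 0:
--         return NOFOUND_NONE
--     if n1 == 0:
--         return ALL_NONE
--     return HAVE_NONE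
-- ===== SOURCE B (Python) =====
-- ALL_NONE     = 0
-- HAVE_NONE    = 1
-- NOFOUND_NONE = 2
--
-- def detectListNone(items):
--     if items is None:
--         return ALL_NONE
--     if all(item is not None for item in items):
--         return NOFOUND_NONE
--     if all(item is None for item in items):
--         return ALL_NONE
--     return HAVE_NONE
-- ===== Notes on version B (the rewrite author's own statement) =====
-- stated objective: simpler
-- what changed: Replaced the two integer counters and post-loop zero tests with two short-circuiting all(...) predicates that classify the list directly.
import Mathlib
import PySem

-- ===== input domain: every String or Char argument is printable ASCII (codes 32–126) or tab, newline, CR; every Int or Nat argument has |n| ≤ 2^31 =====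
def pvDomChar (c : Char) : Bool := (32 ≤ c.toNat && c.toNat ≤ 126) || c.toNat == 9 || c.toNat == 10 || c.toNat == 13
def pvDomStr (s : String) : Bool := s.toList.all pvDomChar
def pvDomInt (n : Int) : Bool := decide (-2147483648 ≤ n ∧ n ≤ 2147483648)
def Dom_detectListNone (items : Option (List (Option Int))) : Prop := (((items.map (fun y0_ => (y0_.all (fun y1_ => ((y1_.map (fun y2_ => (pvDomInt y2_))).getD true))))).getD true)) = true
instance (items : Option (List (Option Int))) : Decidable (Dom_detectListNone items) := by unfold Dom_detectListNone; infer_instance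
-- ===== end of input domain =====

-- B replaces A's two integer counters with two short-circuiting all(...) predicates (simpler).

-- ===== PORT A =====
def detectListNone (items : Option (List (Option Int))) : Int :=
  match items with
  | none => 0
  | some xs =>
    let s := xs.foldl (fun (p : Int × Int) item =>
      if item.isNone then (p.1 + 1, p.2) else (p.1, p.2 + 1)) (0, 0)
    if s.1 = 0 then 2
    else if s.2 = 0 then 0
    else 1

-- ===== PORT B =====
def detectListNone_alt (items : Option (List (Option Int))) : Int :=
  match items with
  | none => 0
  | some xs =>
    if xs.all (fun item => !item.isNone) then 2
    else if xs.all (fun item => item.isNone) then 0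
    else 1

-- ===== PRECONDITION & SPEC =====
def Spec_detectListNone (items : Option (List (Option Int))) (out : Int) : Prop := out = detectListNone_alt items
instance (items : Option (List (Option Int))) (out : Int) : Decidable (Spec_detectListNone items out) := by unfold Spec_detectListNone; infer_instance

-- ===== CLAIM (what is proved, stated in full; the proofs are below) =====
def Claim_equal_detectListNone : Prop := ∀ (items : Option (List (Option Int))), Dom_detectListNone items → Spec_detectListNone items (detectListNone items)

-- ===== LEMMAS AND PROOFS =====

-- the counter fold, run from an arbitrary start, adds the counts of none/non-none items
theorem counts_foldl (xs : List (Option Int)) (a b : Int) :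
    xs.foldl (fun (p : Int × Int) item =>
      if item.isNone then (p.1 + 1, p.2) else (p.1, p.2 + 1)) (a, b)
    = (a + (xs.countP (fun item => item.isNone)), b + (xs.countP (fun item => !item.isNone))) := by
  induction xs generalizing a b with
  | nil => simp
  | cons x xs ih =>
    cases x <;>
      simp only [List.foldl_cons, Option.isNone_none, Option.isNone_some, if_true, if_false,
        ite_true, ite_false, List.countP_cons, Bool.not_true, Bool.not_false] <;>
      rw [ih] <;> simp [Prod.ext_iff] <;> push_cast <;> ring

theorem countP_zero_iff_all (xs : List (Option Int)) (f : Option Int → Bool) :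
    (xs.countP f = 0) ↔ xs.all (fun x => !f x) := by
  simp [List.countP_eq_zero, List.all_eq_true]

-- ===== VERDICT (by name: the statement is the Claim_ definition above) =====
theorem detectListNone_spec : Claim_equal_detectListNone := by
  intro items _
  unfold Spec_detectListNone detectListNone detectListNone_alt
  cases items with
  | none => rfl
  | some xs =>
    simp only [counts_foldl, zero_add]
    have h1 := countP_zero_iff_all xs (fun item => item.isNone)
    have h2 := countP_zero_iff_all xs (fun item => !item.isNone)
    by_cases c1 : xs.countP (fun item => item.isNone) = 0
    · have : xs.all (fun x => !x.isNone) := by simpa using h1.mp c1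
      simp_all
    · have c1' : (xs.countP (fun item => item.isNone) : Int) ≠ 0 := by exact_mod_cast c1
      by_cases c2 : xs.countP (fun item => !item.isNone) = 0
      · have : xs.all (fun x => x.isNone) := by simpa using h2.mp c2
        have : ¬ xs.all (fun x => !x.isNone) := by
          intro hall; apply c1; exact h1.mpr (by simpa using hall)
        simp_all
      · have c2' : (xs.countP (fun item => !item.isNone) : Int) ≠ 0 := by exact_mod_cast c2
        have hno : (xs.all fun x => !x.isNone) = false :=
          Bool.eq_false_iff.mpr (fun h => c1 (h1.mpr (by simpa using h)))
        have hall : (xs.all fun x => x.isNone) = false :=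
          Bool.eq_false_iff.mpr (fun h => c2 (h2.mpr (by simpa using h)))
        rw [if_neg c1', if_neg c2', hno, hall]
        simp
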